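-- pv_equiv track=rewrite | github.com/AdamZhouSE/pythonHomework | Code/CodeRecords/2387/60792/276532.py | upsort
-- ===== SOURCE A (Python) =====
-- def upsort(list1,i,j):
--     for i in range(i,j+1):
--         for j in range(i+1,j+1):
--             if list1[i]>list1[j]:
--                 temp=list1[i]
--                 list1[i]=list1[j]
--                 list1[j]=temp
--     return list1
-- ===== SOURCE B (Python) =====
-- def upsort(list1, i, j):
--     if i < j:
--         list1[i:j+1] = sorted(list1[i:j+1])
--     return list1
-- ===== Notes on version B (the rewrite author's own statement) =====
-- stated objective: idiomatic
-- what changed: Replaces the all-pairs compare-and-swap loops with a single slice assignment that sorts list1[i:j+1] with the built-in sort.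
-- outside the precondition, e.g. on upsort([2, 0, 1], -3, 1): A returns [1, 2, 0], B returns [0, 2, 1]
import Mathlib
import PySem

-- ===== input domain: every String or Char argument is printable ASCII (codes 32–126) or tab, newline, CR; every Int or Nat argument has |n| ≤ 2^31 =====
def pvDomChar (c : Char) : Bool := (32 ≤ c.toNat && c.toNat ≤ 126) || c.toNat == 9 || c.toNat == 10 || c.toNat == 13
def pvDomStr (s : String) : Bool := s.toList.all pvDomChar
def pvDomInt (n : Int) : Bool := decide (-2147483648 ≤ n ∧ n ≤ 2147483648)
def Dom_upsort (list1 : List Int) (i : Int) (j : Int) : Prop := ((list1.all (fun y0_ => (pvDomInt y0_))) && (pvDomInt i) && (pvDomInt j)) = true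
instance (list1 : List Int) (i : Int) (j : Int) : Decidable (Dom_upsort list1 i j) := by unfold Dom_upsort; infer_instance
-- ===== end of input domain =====

-- B replaces A's quadratic all-pairs compare-and-swap with one library sort of the slice list1[i:j+1]
-- (both Pythons mutate list1 in place; the equivalence proved here is about the returned value).


-- ===== PORT A =====
-- The Python rebinds both loop variables over the parameters: the inner `for j in ...`
-- overwrites j, so the fold state carries (list1, j); pyGetD/pySetD are the total forms
-- of list1[...] — exact wherever Pre_upsort holds (all touched indices are then in range).
def upsort (list1 : List Int) (i : Int) (j : Int) : List Int :=
  ((PySem.List.pyRange i (j + 1) 1).foldl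
    (fun (st : List Int × Int) iv =>
      (PySem.List.pyRange (iv + 1) (st.2 + 1) 1).foldl
        (fun (st2 : List Int × Int) jv =>
          if PySem.List.pyGetD st2.1 iv 0 > PySem.List.pyGetD st2.1 jv 0 then
            (PySem.List.pySetD (PySem.List.pySetD st2.1 iv (PySem.List.pyGetD st2.1 jv 0)) jv
               (PySem.List.pyGetD st2.1 iv 0), jv)
          else (st2.1, jv)) st)
    (list1, j)).1

-- ===== PORT B =====
-- Source B:  if i < j: list1[i:j+1] = sorted(list1[i:j+1]);  return list1
-- Slice assignment s[a:b] = t is ported by hand as s[:a'] ++ t ++ s[max(a',b'):] with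
-- a' = clampIdx a, b' = clampIdx b — exactly CPython's semantics for a step-1 slice.
def upsort_alt (list1 : List Int) (i : Int) (j : Int) : List Int :=
  if i < j then
    list1.take (PySem.List.clampIdx list1.length i) ++
    PySem.List.sorted (PySem.List.slice list1 (some i) (some (j + 1))) (fun x => x) false ++
    list1.drop (max (PySem.List.clampIdx list1.length i) (PySem.List.clampIdx list1.length (j + 1)))
  else list1

-- ===== PRECONDITION & SPEC =====
-- Pre_ excludes (a) inputs where A raises IndexError (some compared index outside [-len, len)),
-- and (b) the unspecified corner of a negative start i < j, where A's negative-index wraparound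
-- revisits positions under two names and B reads Python slice semantics: both values there are
-- accidents of the respective mechanism and neither is a specified behaviour of a subarray sort.
def Pre_upsort (list1 : List Int) (i : Int) (j : Int) : Prop :=
  j ≤ i ∨ (0 ≤ i ∧ j < (list1.length : Int))
instance (list1 : List Int) (i : Int) (j : Int) : Decidable (Pre_upsort list1 i j) := by
  unfold Pre_upsort; infer_instance

def pvWitness_upsort : List Int × Int × Int := ([3, 1, 2], 0, 2)

def Spec_upsort (list1 : List Int) (i : Int) (j : Int) (out : List Int) : Prop := out = upsort_alt list1 i j
instance (list1 : List Int) (i : Int) (j : Int) (out : List Int) : Decidable (Spec_upsort list1 i j out) := by unfold Spec_upsort; infer_instance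

-- ===== CLAIM (what is proved, stated in full; the proofs are below) =====
def Claim_equal_upsort : Prop := ∀ (list1 : List Int) (i : Int) (j : Int), Dom_upsort list1 i j → Pre_upsort list1 i j → Spec_upsort list1 i j (upsort list1 i j)

-- ===== LEMMAS AND PROOFS =====

-- one comparison/swap of A at fixed outer position iv and inner position jv
def stepA (iv : Int) (l : List Int) (jv : Int) : List Int :=
  if PySem.List.pyGetD l iv 0 > PySem.List.pyGetD l jv 0 then
    PySem.List.pySetD (PySem.List.pySetD l iv (PySem.List.pyGetD l jv 0)) jv
      (PySem.List.pyGetD l iv 0)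
  else l

-- one inner pass of A in segment form: cur sits at the outer position, mid is already passed,
-- rest is still to be compared; returns (final element at the outer position, rest of the segment)
def selPass (cur : Int) (mid rest : List Int) : Int × List Int :=
  match rest with
  | [] => (cur, mid)
  | y :: r => if cur > y then selPass y (mid ++ [cur]) r else selPass cur (mid ++ [y]) r

theorem selPass_len (rest : List Int) : ∀ (cur : Int) (mid : List Int),
    ((selPass cur mid rest).2).length = mid.length + rest.length := by
  induction rest with
  | nil => intro cur mid; simp [selPass]
  | cons y r ih =>
    intro cur mid
    simp only [selPass]
    split <;> simp [ih] <;> omega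

theorem selPass_perm (rest : List Int) : ∀ (cur : Int) (mid : List Int),
    ((selPass cur mid rest).1 :: (selPass cur mid rest).2).Perm (cur :: (mid ++ rest)) := by
  induction rest with
  | nil => intro cur mid; simp [selPass]
  | cons y r ih =>
    intro cur mid
    simp only [selPass]
    split
    · refine (ih y (mid ++ [cur])).trans ?_
      have h1 : ((mid ++ [cur]) ++ r).Perm (cur :: (mid ++ r)) := by simp
      have h2 : (mid ++ (y :: r)).Perm (y :: (mid ++ r)) := List.perm_middle
      exact ((h1.cons y).trans (List.Perm.swap cur y _)).trans ((h2.symm).cons cur)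
    · refine (ih cur (mid ++ [y])).trans ?_
      have h1 : ((mid ++ [y]) ++ r).Perm (y :: (mid ++ r)) := by simp
      have h2 : (mid ++ (y :: r)).Perm (y :: (mid ++ r)) := List.perm_middle
      exact (h1.trans h2.symm).cons cur

theorem selPass_min (rest : List Int) : ∀ (cur : Int) (mid : List Int),
    (selPass cur mid rest).1 ≤ cur ∧ ∀ y ∈ rest, (selPass cur mid rest).1 ≤ y := by
  induction rest with
  | nil => intro cur mid; simp [selPass]
  | cons y r ih =>
    intro cur mid
    simp only [selPass]
    split
    · rename_i h
      obtain ⟨h1, h2⟩ := ih y (mid ++ [cur])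
      refine ⟨le_trans h1 (le_of_lt h), ?_⟩
      intro z hz
      rcases List.mem_cons.1 hz with rfl | hz
      · exact h1
      · exact h2 z hz
    · rename_i h
      obtain ⟨h1, h2⟩ := ih cur (mid ++ [y])
      refine ⟨h1, ?_⟩
      intro z hz
      rcases List.mem_cons.1 hz with rfl | hz
      · exact le_trans h1 (by omega)
      · exact h2 z hz

-- pure selection sort on a plain list
def selsort : List Int → List Int
  | [] => []
  | x :: r =>
    (selPass x [] r).1 :: selsort (selPass x [] r).2
termination_by s => s.length
decreasing_by simp [selPass_len]

theorem selsort_eq_sorted (s : List Int) : selsort s = PySem.List.sorted s (fun x => x) false := by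
  induction s using selsort.induct with
  | case1 =>
    rw [selsort, PySem.List.sorted_eq_self_of_pairwise _ _ (by simp)]
  | case2 x r ih =>
    set m := (selPass x [] r).1 with hm
    set p2 := (selPass x [] r).2 with hp2
    have hperm : (m :: p2).Perm (x :: r) := by
      rw [hm, hp2]; simpa using selPass_perm r x []
    have hmin := selPass_min r x []
    rw [selsort, ih]
    symm
    apply PySem.List.sorted_id_eq_of_perm_of_pairwise
    · exact ((PySem.List.sorted_perm (xs := p2) (key := fun x => x) (rev := false)).cons m).trans hperm
    · rw [List.pairwise_cons]
      constructor
      · intro b hb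
        have hb' : b ∈ p2 := (PySem.List.mem_sorted _ _ _ _).1 hb
        have : b ∈ x :: r := hperm.subset (by simp [hb'])
        rcases List.mem_cons.1 this with rfl | hbr
        · exact hmin.1
        · exact hmin.2 b hbr
      · have := PySem.List.sorted_pairwise (xs := p2) (key := fun x => x)
        simpa using this

-- reading / writing at the seam of an append
theorem getAt (X Y : List Int) (z d : Int) :
    PySem.List.pyGetD (X ++ z :: Y) ((X.length : Int)) d = z := by
  rw [PySem.List.pyGetD_natCast]
  simp [List.getD_eq_getElem?_getD]

theorem setAt (X Y : List Int) (z v : Int) :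
    PySem.List.pySetD (X ++ z :: Y) ((X.length : Int)) v = X ++ v :: Y := by
  rw [PySem.List.pySetD_natCast]
  simp [List.set_append_right]

-- the inner loop of A is `selPass` on the segment
theorem inner_fold (j : Int) (rest : List Int) : ∀ (mid : List Int) (cur : Int) (P S : List Int)
    (iv : Int), 0 ≤ iv → (P.length : Int) = iv →
    (rest.length : Int) = j - iv - mid.length →
    (PySem.List.pyRange (iv + 1 + mid.length) (j + 1) 1).foldl (stepA iv)
      (P ++ cur :: (mid ++ (rest ++ S)))
    = P ++ (selPass cur mid rest).1 :: ((selPass cur mid rest).2 ++ S) := by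
  induction rest with
  | nil =>
    intro mid cur P S iv hiv hP hr
    rw [PySem.List.pyRange_one_eq_nil (by simp at hr; omega)]
    simp [selPass]
  | cons y r ih =>
    intro mid cur P S iv hiv hP hr
    have hlen : (r.length : Int) + 1 = j - iv - mid.length := by
      simpa [Int.add_comm] using hr
    rw [PySem.List.pyRange_one_cons (by omega)]
    simp only [List.foldl_cons]
    have hfact : P ++ cur :: (mid ++ ((y :: r) ++ S)) = (P ++ cur :: mid) ++ y :: (r ++ S) := by
      simp
    have hlenP2 : ((P ++ cur :: mid).length : Int) = iv + 1 + mid.length := by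
      simp [hP]; omega
    have hget_iv : PySem.List.pyGetD (P ++ cur :: (mid ++ ((y :: r) ++ S))) iv 0 = cur := by
      rw [← hP]; exact getAt P _ cur 0
    have hget_jv : PySem.List.pyGetD (P ++ cur :: (mid ++ ((y :: r) ++ S)))
        (iv + 1 + mid.length) 0 = y := by
      rw [hfact, ← hlenP2]; exact getAt _ _ y 0
    rw [stepA, hget_iv, hget_jv]
    split
    · rename_i h
      have hset1 : PySem.List.pySetD (P ++ cur :: (mid ++ ((y :: r) ++ S))) iv y
          = P ++ y :: (mid ++ ((y :: r) ++ S)) := by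
        rw [← hP]; exact setAt P _ cur y
      have hfact2 : P ++ y :: (mid ++ ((y :: r) ++ S)) = (P ++ y :: mid) ++ y :: (r ++ S) := by
        simp
      have hlenP3 : ((P ++ y :: mid).length : Int) = iv + 1 + mid.length := by
        simp [hP]; omega
      have hset2 : PySem.List.pySetD (P ++ y :: (mid ++ ((y :: r) ++ S)))
          (iv + 1 + mid.length) cur = P ++ y :: ((mid ++ [cur]) ++ (r ++ S)) := by
        rw [hfact2, ← hlenP3, setAt]; simp
      rw [hset1, hset2]
      have := ih (mid ++ [cur]) y P S iv hiv hP (by simp; omega)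
      simp only [List.length_append, List.length_cons, List.length_nil] at this ⊢
      have harr : (iv + 1 + (mid.length + 1) : Int) = iv + 1 + mid.length + 1 := by ring
      rw [selPass, if_pos h]
      simpa [harr, List.append_assoc] using this
    · rename_i h
      have := ih (mid ++ [y]) cur P S iv hiv hP (by simp; omega)
      have harr : (iv + 1 + (mid.length + 1) : Int) = iv + 1 + mid.length + 1 := by ring
      rw [selPass, if_neg h]
      simp only [List.length_append, List.length_cons, List.length_nil] at this ⊢
      simpa [harr, List.append_assoc] using this

-- the pair state of A's port: the inner loop only rebinds the second component
theorem foldl_pair (iv : Int) (xs : List Int) : ∀ (l : List Int) (c : Int),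
    (xs.foldl
      (fun (st2 : List Int × Int) jv =>
        if PySem.List.pyGetD st2.1 iv 0 > PySem.List.pyGetD st2.1 jv 0 then
          (PySem.List.pySetD (PySem.List.pySetD st2.1 iv (PySem.List.pyGetD st2.1 jv 0)) jv
             (PySem.List.pyGetD st2.1 iv 0), jv)
        else (st2.1, jv)) (l, c))
    = (xs.foldl (stepA iv) l, xs.getLast?.getD c) := by
  induction xs with
  | nil => intro l c; simp
  | cons x xs ih =>
    intro l c
    simp only [List.foldl_cons]
    have hstep : (if PySem.List.pyGetD l iv 0 > PySem.List.pyGetD l x 0 then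
        (PySem.List.pySetD (PySem.List.pySetD l iv (PySem.List.pyGetD l x 0)) x
           (PySem.List.pyGetD l iv 0), x)
      else (l, x)) = (stepA iv l x, x) := by
      unfold stepA; split <;> rfl
    rw [hstep, ih]
    congr 1
    cases xs <;> simp [List.getLast?_cons]

-- the outer loop keeps j: drop the pair state
theorem outer_pair (j : Int) (ys : List Int) : ∀ (l : List Int), (∀ y ∈ ys, y ≤ j) →
    (ys.foldl
      (fun (st : List Int × Int) iv =>
        (PySem.List.pyRange (iv + 1) (st.2 + 1) 1).foldl
          (fun (st2 : List Int × Int) jv =>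
            if PySem.List.pyGetD st2.1 iv 0 > PySem.List.pyGetD st2.1 jv 0 then
              (PySem.List.pySetD (PySem.List.pySetD st2.1 iv (PySem.List.pyGetD st2.1 jv 0)) jv
                 (PySem.List.pyGetD st2.1 iv 0), jv)
            else (st2.1, jv)) st)
      (l, j)).1
    = ys.foldl (fun l iv => (PySem.List.pyRange (iv + 1) (j + 1) 1).foldl (stepA iv) l) l := by
  induction ys with
  | nil => intro l _; simp
  | cons y ys ih =>
    intro l hmem
    have hy : y ≤ j := hmem y (by simp)
    simp only [List.foldl_cons]
    rw [foldl_pair]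
    have hlast : (PySem.List.pyRange (y + 1) (j + 1) 1).getLast?.getD j = j := by
      rcases lt_or_eq_of_le hy with h | h
      · rw [PySem.List.pyRange_one_succ_right (by omega)]
        simp
      · rw [PySem.List.pyRange_one_eq_nil (by omega)]; rfl
    rw [hlast]
    exact ih _ (fun z hz => hmem z (by simp [hz]))

-- the outer loop of A is selsort on the segment
theorem outer_fold (j : Int) (s : List Int) : ∀ (P S : List Int) (iv : Int),
    0 ≤ iv → (P.length : Int) = iv → (s.length : Int) = j + 1 - iv →
    (PySem.List.pyRange iv (j + 1) 1).foldl
      (fun l iv' => (PySem.List.pyRange (iv' + 1) (j + 1) 1).foldl (stepA iv') l)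
      (P ++ (s ++ S))
    = P ++ (selsort s ++ S) := by
  induction s using selsort.induct with
  | case1 =>
    intro P S iv hiv hP hs
    rw [PySem.List.pyRange_one_eq_nil (by simp at hs; omega)]
    simp [selsort]
  | case2 x r ih =>
    intro P S iv hiv hP hs
    have hx : iv ≤ j := by simp at hs; omega
    rw [PySem.List.pyRange_one_cons (by omega)]
    simp only [List.foldl_cons]
    have hinner := inner_fold j r [] x P S iv hiv hP (by simp at hs ⊢; omega)
    simp only [List.length_nil, Nat.cast_zero, Int.add_zero, List.nil_append] at hinner
    rw [show P ++ (x :: r ++ S) = P ++ x :: (r ++ S) by simp, hinner]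
    have hIH := ih (P ++ [(selPass x [] r).1]) S (iv + 1) (by omega)
      (by simp [hP]) (by simp [selPass_len]; simp at hs; omega)
    calc (PySem.List.pyRange (iv + 1) (j + 1) 1).foldl
          (fun l iv' => (PySem.List.pyRange (iv' + 1) (j + 1) 1).foldl (stepA iv') l)
          (P ++ (selPass x [] r).1 :: ((selPass x [] r).2 ++ S))
        = (PySem.List.pyRange (iv + 1) (j + 1) 1).foldl
          (fun l iv' => (PySem.List.pyRange (iv' + 1) (j + 1) 1).foldl (stepA iv') l)
          ((P ++ [(selPass x [] r).1]) ++ ((selPass x [] r).2 ++ S)) := by simp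
      _ = (P ++ [(selPass x [] r).1]) ++ (selsort (selPass x [] r).2 ++ S) := hIH
      _ = P ++ (selsort (x :: r) ++ S) := by rw [selsort]; simp

-- ===== VERDICT (by name: the statement is the Claim_ definition above) =====
theorem upsort_spec : Claim_equal_upsort := by
  intro list1 i j _ hpre
  unfold Spec_upsort
  by_cases hij : i < j
  · obtain ⟨h0, hjn⟩ : 0 ≤ i ∧ j < (list1.length : Int) := by
      rcases hpre with h | h
      · omega
      · exact h
    have hab : i.toNat ≤ (j + 1).toNat := by omega
    have hbn : (j + 1).toNat ≤ list1.length := by omega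
    have h1 : list1.take (j + 1).toNat
        = list1.take i.toNat ++ (list1.drop i.toNat).take ((j + 1).toNat - i.toNat) := by
      rw [show (j + 1).toNat = i.toNat + ((j + 1).toNat - i.toNat) by omega, List.take_add]
      congr 2
      omega
    have hsplit : list1 = list1.take i.toNat ++
        (((list1.drop i.toNat).take ((j + 1).toNat - i.toNat)) ++ list1.drop (j + 1).toNat) := by
      conv_lhs => rw [← List.take_append_drop (j + 1).toNat list1]
      rw [h1, List.append_assoc]
    have hPlen : ((list1.take i.toNat).length : Int) = i := by
      simp [List.length_take]; omega
    have hslen : ((((list1.drop i.toNat).take ((j + 1).toNat - i.toNat))).length : Int)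
        = j + 1 - i := by
      simp [List.length_take, List.length_drop]; omega
    have hA : upsort list1 i j = list1.take i.toNat ++
        (selsort ((list1.drop i.toNat).take ((j + 1).toNat - i.toNat)) ++ list1.drop (j + 1).toNat) := by
      unfold upsort
      rw [outer_pair j _ _ (fun y hy => by
        have := PySem.List.mem_pyRange_one.1 hy; omega)]
      conv_lhs => rw [hsplit]
      exact outer_fold j _ _ _ i h0 hPlen hslen
    rw [hA, selsort_eq_sorted]
    unfold upsort_alt
    rw [if_pos hij]
    have hc1 : PySem.List.clampIdx list1.length i = i.toNat := by
      rw [show i = (i.toNat : Int) by omega, PySem.List.clampIdx_natCast]; omega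
    have hc2 : PySem.List.clampIdx list1.length (j + 1) = (j + 1).toNat := by
      rw [show j + 1 = ((j + 1).toNat : Int) by omega, PySem.List.clampIdx_natCast]; omega
    rw [hc1, hc2, show max i.toNat (j + 1).toNat = (j + 1).toNat by omega,
        PySem.List.slice_toNat _ h0 (by omega : (0:Int) ≤ j + 1)]
    simp
  · have hji : j ≤ i := not_lt.1 hij
    unfold upsort upsort_alt
    rw [if_neg hij]
    rcases lt_or_eq_of_le hji with h | h
    · rw [PySem.List.pyRange_one_eq_nil (by omega)]
      rfl
    · subst h
      rw [PySem.List.pyRange_one_singleton]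
      simp only [List.foldl_cons, List.foldl_nil]
      rw [PySem.List.pyRange_one_eq_nil (by omega)]
      rfl
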